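-- pv_equiv track=rewrite | github.com/JaBrik228/cultnova-backend | tools/tests/test_public_static_manifest.py | normalize_relative_path
-- ===== SOURCE A (Python) =====
-- def normalize_relative_path(raw: str) -> str:
--     value = raw.strip().replace("\\", "/")
--     if not value:
--         raise ValueError("path is empty")
--     if value.startswith("/") or value.startswith("\\"):
--         raise ValueError("path must be relative")
--     while value.startswith("./"):
--         value = value[2:]
--     parts = value.split("/")
--     if any(part in {"", ".", ".."} for part in parts):
--         raise ValueError("path contains invalid segments")
--     return value
-- ===== SOURCE B (Python) =====
-- def normalize_relative_path(raw: str) -> str: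
--     # Single left-to-right character scan: trim whitespace bounds, then build
--     # segments in one pass (treating '/' and '\\' both as separators),
--     # dropping leading "." segments and validating each segment as it closes.
--     i, j = 0, len(raw)
--     while i < j and raw[i] in " \t\n\r\v\f":
--         i += 1
--     while j > i and raw[j - 1] in " \t\n\r\v\f":
--         j -= 1
--     if i == j:
--         raise ValueError("path is empty")
--     if raw[i] in "/\\":
--         raise ValueError("path must be relative")
--     out = []
--     seg = []
--     for k in range(i, j):
--         c = raw[k]
--         if c == "/" or c == "\\":
--             s = "".join(seg)
--             if s == "." and not out:
--                 pass  # leading "./" component: dropped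
--             elif s in ("", ".", ".."):
--                 raise ValueError("path contains invalid segments")
--             else:
--                 out.append(s)
--             seg = []
--         else:
--             seg.append(c)
--     s = "".join(seg)
--     if s in ("", ".", ".."):
--         raise ValueError("path contains invalid segments")
--     out.append(s)
--     return "/".join(out)
-- ===== Notes on version B (the rewrite author's own statement) =====
-- stated objective: alternative
-- what changed: B is a one-pass character scanner with an explicit state (current segment, emitted segments): it trims whitespace by index bounds, treats '/' and '\' both as separators (so no replace pass), drops leading '.' segments and validates each segment the moment it closes, instead of A's staged pipeline strip/replace/prefix-stripping-loop/split/validate over whole strings.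
-- outside the precondition, e.g. on normalize_relative_path(''): A raises ValueError, B raises ValueError; on normalize_relative_path('/'): A raises ValueError, B raises ValueError; on normalize_relative_path('.'): A raises ValueError, B raises ValueError
import Mathlib
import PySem

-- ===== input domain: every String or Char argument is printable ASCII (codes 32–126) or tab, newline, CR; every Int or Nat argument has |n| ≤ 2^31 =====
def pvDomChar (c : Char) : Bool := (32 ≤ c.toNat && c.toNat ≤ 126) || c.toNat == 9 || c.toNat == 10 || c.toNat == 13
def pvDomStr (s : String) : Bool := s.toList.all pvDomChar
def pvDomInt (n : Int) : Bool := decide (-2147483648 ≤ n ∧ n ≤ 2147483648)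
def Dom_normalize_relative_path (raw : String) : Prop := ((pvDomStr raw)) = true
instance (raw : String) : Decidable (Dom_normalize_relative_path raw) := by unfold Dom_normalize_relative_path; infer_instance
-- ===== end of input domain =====

-- B replaces A's staged pipeline (strip/replace/"./"-stripping loop/split/validate) by a single
-- left-to-right character scan that builds, drops and validates segments as it goes; same O(n) cost,
-- different algorithmic decomposition. Where the Python raises ValueError (excluded by Pre_), both
-- ports return "".

-- ===== PORT A =====
-- A's `while value.startswith("./"): value = value[2:]`, on the character list
def pvAStripDotSlash : List Char → List Char
  | c :: d :: rest => if c = '.' ∧ d = '/' then pvAStripDotSlash rest else c :: d :: rest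
  | l => l

def normalize_relative_path (raw : String) : String :=
  let value := PySem.Chars.replace (PySem.Chars.strip raw.toList) ['\\'] ['/']
  if value = [] then ""                                           -- raise ValueError("path is empty")
  else if PySem.Chars.startswith value ['/'] || PySem.Chars.startswith value ['\\'] then ""
                                                                  -- raise ValueError("path must be relative")
  else
    let value := pvAStripDotSlash value
    let parts := PySem.Chars.splitOn value ['/']
    if parts.any (fun p => p == [] || p == ['.'] || p == ['.', '.']) then ""
                                                                  -- raise ValueError("path contains invalid segments")
    else String.ofList value

-- ===== PORT B =====
-- Source B's `raw[k] in " \t\n\r\v\f"` (code-point membership test)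
def pvWs (c : Char) : Bool :=
  c.toNat == 32 || c.toNat == 9 || c.toNat == 10 || c.toNat == 11 || c.toNat == 12 || c.toNat == 13

-- Source B's two index-trimming while loops: advance i over leading whitespace, retreat j over trailing
def pvTrim (l : List Char) : List Char :=
  (((l.dropWhile pvWs).reverse.dropWhile pvWs)).reverse

-- Source B's `c == "/" or c == "\\"`
def pvSep (c : Char) : Bool := c == '/' || c == '\\'

-- Source B's `s in ("", ".", "..")`
def pvBad (s : List Char) : Bool := s == ([] : List Char) || s == ['.'] || s == ['.', '.']

-- Source B's scanning for-loop; `seg` is kept reversed (append = cons), `none` = ValueError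
def pvScan (out : List (List Char)) (seg : List Char) : List Char → Option (List (List Char))
  | [] =>
      let s := seg.reverse
      if pvBad s then none else some (out ++ [s])
  | c :: r =>
      if pvSep c then
        let s := seg.reverse
        if s == ['.'] && out.isEmpty then pvScan out [] r
        else if pvBad s then none else pvScan (out ++ [s]) [] r
      else pvScan out (c :: seg) r

def normalize_relative_path_alt (raw : String) : String :=
  match pvTrim raw.toList with
  | [] => ""                                                      -- raise ValueError("path is empty")
  | c :: _ =>
      if pvSep c then ""                                          -- raise ValueError("path must be relative")
      else
        match pvScan [] [] (pvTrim raw.toList) with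
        | none => ""                                              -- raise ValueError("path contains invalid segments")
        | some out => String.ofList (PySem.Chars.join ['/'] out)

-- ===== PRECONDITION & SPEC =====
-- Pre_ holds exactly where the Python A returns normally (everywhere else it raises ValueError):
-- the stripped/normalized string is non-empty, does not start with '/', and after discarding the
-- leading run of "." segments at least one segment remains and none of them is "", "." or "..".
def Pre_normalize_relative_path (raw : String) : Prop :=
  let value := PySem.Chars.replace (PySem.Chars.strip raw.toList) ['\\'] ['/']
  value ≠ [] ∧ PySem.Chars.startswith value ['/'] = false ∧
  (let rest := (PySem.Chars.splitOn value ['/']).dropWhile (· == ['.'])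
   rest ≠ [] ∧ ∀ p ∈ rest, p ≠ [] ∧ p ≠ ['.'] ∧ p ≠ ['.', '.'])
instance (raw : String) : Decidable (Pre_normalize_relative_path raw) := by
  unfold Pre_normalize_relative_path; infer_instance

def pvWitness_normalize_relative_path : String := "./a/b.txt"

def Spec_normalize_relative_path (raw : String) (out : String) : Prop := out = normalize_relative_path_alt raw
instance (raw : String) (out : String) : Decidable (Spec_normalize_relative_path raw out) := by unfold Spec_normalize_relative_path; infer_instance

-- ===== CLAIM (what is proved, stated in full; the proofs are below) =====
def Claim_equal_normalize_relative_path : Prop := ∀ (raw : String), Dom_normalize_relative_path raw → Pre_normalize_relative_path raw → Spec_normalize_relative_path raw (normalize_relative_path raw)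

-- ===== LEMMAS AND PROOFS =====

-- the single-character substitution '\\' → '/'
def pvRepl (c : Char) : Char := if c = '\\' then '/' else c

-- mathematical characterisation of splitting on the single character '/'
def pvSplitC : List Char → List (List Char)
  | [] => [[]]
  | c :: r => if c = '/' then [] :: pvSplitC r else (pvSplitC r).modifyHead (c :: ·)

-- splitting the ORIGINAL characters on both separators '/' and '\\'
def pvSplitD : List Char → List (List Char)
  | [] => [[]]
  | c :: r => if pvSep c then [] :: pvSplitD r else (pvSplitD r).modifyHead (c :: ·)

-- A's old-style "drop leading '.' segments" on the parts list (proof-side bridge)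
def pvBDropDotSegs : List (List Char) → List (List Char)
  | p :: x :: rest => if p = ['.'] then pvBDropDotSegs (x :: rest) else p :: x :: rest
  | l => l

-- segment-list form of B's scan (proof-side bridge)
def pvProc (out : List (List Char)) : List (List Char) → Option (List (List Char))
  | [] => some out
  | [s] => if pvBad s then none else some (out ++ [s])
  | s :: r :: rest =>
      if s == ['.'] && out.isEmpty then pvProc out (r :: rest)
      else if pvBad s then none else pvProc (out ++ [s]) (r :: rest)

theorem pvSplitC_ne_nil (l : List Char) : pvSplitC l ≠ [] := by
  induction l with
  | nil => simp [pvSplitC]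
  | cons c r ih =>
    simp only [pvSplitC]
    split_ifs
    · simp
    · intro h
      have := congrArg List.length h
      simp at this
      exact ih this

theorem pvSplitD_ne_nil (l : List Char) : pvSplitD l ≠ [] := by
  induction l with
  | nil => simp [pvSplitD]
  | cons c r ih =>
    simp only [pvSplitD]
    split_ifs
    · simp
    · intro h
      have := congrArg List.length h
      simp at this
      exact ih this

theorem pvSplitOn_go_eq (fuel : Nat) (l cur : List Char) (acc : List (List Char))
    (h : l.length ≤ fuel) :
    PySem.Chars.splitOn.go ['/'] fuel l cur acc
      = acc.reverse ++ (pvSplitC l).modifyHead (cur.reverse ++ ·) := by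
  induction fuel generalizing l cur acc with
  | zero =>
    have : l = [] := List.length_eq_zero_iff.mp (Nat.le_zero.mp h)
    subst this
    simp [PySem.Chars.splitOn.go, pvSplitC]
  | succ n ih =>
    cases l with
    | nil => simp [PySem.Chars.splitOn.go, pvSplitC]
    | cons c rest =>
      by_cases hc : c = '/'
      · subst hc
        rw [PySem.Chars.splitOn.go]
        simp only [List.isPrefixOf, beq_self_eq_true, Bool.true_and, if_pos]
        have hdrop : List.drop ['/'].length ('/' :: rest) = rest := rfl
        rw [hdrop, ih rest [] (cur.reverse :: acc) (by simpa using Nat.le_of_succ_le_succ h)]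
        simp [pvSplitC]
        cases pvSplitC rest <;> simp
      · rw [PySem.Chars.splitOn.go]
        have hpre : List.isPrefixOf ['/'] (c :: rest) = false := by
          simp [List.isPrefixOf]
          intro hcc
          exact absurd hcc.symm hc
        simp only [hpre, Bool.false_eq_true, if_false]
        rw [ih rest (c :: cur) acc (by simpa using Nat.le_of_succ_le_succ h)]
        simp only [pvSplitC, if_neg hc]
        rcases List.exists_cons_of_ne_nil (pvSplitC_ne_nil rest) with ⟨h1, t1, he⟩
        simp [he]

theorem pvSplitOn_eq (l : List Char) : PySem.Chars.splitOn l ['/'] = pvSplitC l := by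
  rw [PySem.Chars.splitOn, pvSplitOn_go_eq (l.length + 1) l [] [] (Nat.le_succ _)]
  rcases List.exists_cons_of_ne_nil (pvSplitC_ne_nil l) with ⟨h1, t1, he⟩
  simp [he]

theorem pvJoin_splitC (l : List Char) : PySem.Chars.join ['/'] (pvSplitC l) = l := by
  induction l with
  | nil => simp [pvSplitC, PySem.Chars.join, List.intercalate]
  | cons c r ih =>
    rcases List.exists_cons_of_ne_nil (pvSplitC_ne_nil r) with ⟨h1, t1, he⟩
    by_cases hc : c = '/'
    · subst hc
      rw [pvSplitC, if_pos rfl, he, PySem.Chars.join_cons_cons, ← he, ih]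
      simp
    · rw [pvSplitC, if_neg hc, he, List.modifyHead_cons]
      cases t1 with
      | nil =>
        rw [he, PySem.Chars.join_singleton] at ih
        rw [PySem.Chars.join_singleton, ih]
      | cons q t =>
        rw [PySem.Chars.join_cons_cons]
        rw [he, PySem.Chars.join_cons_cons] at ih
        simp [← ih]

theorem pvSplitC_dotslash (r : List Char) : pvSplitC ('.' :: '/' :: r) = ['.'] :: pvSplitC r := by
  simp [pvSplitC]

theorem pvSplitC_shape (v : List Char) (y : List Char) (t : List (List Char))
    (h : pvSplitC v = ['.'] :: y :: t) : ∃ r, v = '.' :: '/' :: r := by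
  cases v with
  | nil => simp [pvSplitC] at h
  | cons c r =>
    simp only [pvSplitC] at h
    split_ifs at h with hc
    · simp at h
    · rcases List.exists_cons_of_ne_nil (pvSplitC_ne_nil r) with ⟨h1, t1, he⟩
      rw [he] at h
      simp only [List.modifyHead_cons, List.cons.injEq] at h
      obtain ⟨h2, h3⟩ := h
      obtain ⟨hc', hh1⟩ : c = '.' ∧ h1 = [] := by simpa using h2
      cases r with
      | nil =>
        rw [hh1, h3] at he
        simp [pvSplitC] at he
      | cons c' r' =>
        simp only [pvSplitC] at he
        split_ifs at he with hc2
        · exact ⟨r', by rw [hc', hc2]⟩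
        · rcases List.exists_cons_of_ne_nil (pvSplitC_ne_nil r') with ⟨h2', t2, he2⟩
          rw [he2] at he
          simp only [List.modifyHead_cons, List.cons.injEq] at he
          rw [hh1] at he
          simp at he

theorem pvBDrop_of_not_dot (l : List (List Char)) (h : ∀ y t, l ≠ ['.'] :: y :: t) :
    pvBDropDotSegs l = l := by
  match l with
  | [] => rfl
  | [p] => rfl
  | p :: x :: rest =>
    rw [pvBDropDotSegs]
    rw [if_neg]
    intro hp
    exact h x rest (by rw [hp])

theorem pvMain : ∀ (v : List Char), pvSplitC (pvAStripDotSlash v) = pvBDropDotSegs (pvSplitC v)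
  | [] => by decide
  | [c] => by
    by_cases hc : c = '/' <;>
      simp [pvAStripDotSlash, pvSplitC, pvBDropDotSegs, hc]
  | c :: d :: rest => by
    by_cases hcd : c = '.' ∧ d = '/'
    · obtain ⟨hc, hd⟩ := hcd
      subst hc; subst hd
      rw [pvAStripDotSlash, if_pos ⟨rfl, rfl⟩, pvMain rest, pvSplitC_dotslash]
      rcases List.exists_cons_of_ne_nil (pvSplitC_ne_nil rest) with ⟨h1, t1, he⟩
      rw [he, pvBDropDotSegs, if_pos rfl]
    · rw [pvAStripDotSlash, if_neg hcd]
      rw [pvBDrop_of_not_dot]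
      intro y t h
      rcases pvSplitC_shape _ _ _ h with ⟨r, hr⟩
      simp only [List.cons.injEq] at hr
      exact hcd ⟨hr.1, hr.2.1⟩

theorem pvBDrop_eq_dropWhile (l : List (List Char)) (h : l.dropWhile (· == ['.']) ≠ []) :
    pvBDropDotSegs l = l.dropWhile (· == ['.']) := by
  induction l with
  | nil => simp at h
  | cons p rest ih =>
    by_cases hp : p = ['.']
    · subst hp
      rw [List.dropWhile_cons_of_pos (by simp)] at h ⊢
      cases rest with
      | nil => simp at h
      | cons x r =>
        rw [pvBDropDotSegs, if_pos rfl]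
        exact ih h
    · rw [List.dropWhile_cons_of_neg (by simpa using hp)]
      cases rest with
      | nil => rfl
      | cons x r => rw [pvBDropDotSegs, if_neg hp]

-- replace with a one-character pattern and replacement is a character map
theorem pvReplaceGo_eq_map (fuel : Nat) (l acc : List Char) (hf : l.length ≤ fuel) :
    PySem.Chars.replace.go ['\\'] ['/'] fuel l acc = acc.reverse ++ l.map pvRepl := by
  induction fuel generalizing l acc with
  | zero =>
    have : l = [] := List.length_eq_zero_iff.mp (Nat.le_zero.mp hf)
    subst this
    simp [PySem.Chars.replace.go]
  | succ n ih =>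
    cases l with
    | nil => simp [PySem.Chars.replace.go]
    | cons c t =>
      by_cases hc : c = '\\'
      · subst hc
        rw [PySem.Chars.replace.go]
        simp only [List.isPrefixOf, beq_self_eq_true, Bool.true_and, if_pos,
          List.length_cons, List.length_nil, List.drop_succ_cons, List.drop_zero,
          List.reverse_singleton, List.singleton_append]
        rw [ih t ('/' :: acc) (by simpa using Nat.le_of_succ_le_succ hf)]
        simp [pvRepl]
      · rw [PySem.Chars.replace.go]
        have hpre : List.isPrefixOf ['\\'] (c :: t) = false := by
          simp [List.isPrefixOf]
          intro hcc
          exact absurd hcc.symm hc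
        simp only [hpre, Bool.false_eq_true, if_false]
        rw [ih t (c :: acc) (by simpa using Nat.le_of_succ_le_succ hf)]
        simp [pvRepl, hc]

theorem pvReplace_eq_map (s : List Char) :
    PySem.Chars.replace s ['\\'] ['/'] = s.map pvRepl := by
  rw [PySem.Chars.replace]
  simp only [List.isEmpty_cons, Bool.false_eq_true, if_false]
  exact pvReplaceGo_eq_map s.length s [] le_rfl

-- on the domain's characters B's whitespace test agrees with Python's str.strip
theorem pvWs_eq_isspace (c : Char) (h : pvDomChar c = true) :
    pvWs c = PySem.Chars.isspace c := by
  simp only [pvDomChar, Bool.or_eq_true, Bool.and_eq_true, decide_eq_true_eq, beq_iff_eq] at h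
  rw [Bool.eq_iff_iff]
  simp only [pvWs, PySem.Chars.isspace, Bool.or_eq_true, Bool.and_eq_true, decide_eq_true_eq,
    beq_iff_eq]
  omega

theorem pvDropWhile_congr {α : Type} (p q : α → Bool) (l : List α)
    (h : ∀ x ∈ l, p x = q x) : l.dropWhile p = l.dropWhile q := by
  induction l with
  | nil => rfl
  | cons a t ih =>
    have ha := h a (by simp)
    by_cases hp : p a = true
    · rw [List.dropWhile_cons_of_pos hp, List.dropWhile_cons_of_pos (ha ▸ hp),
        ih (fun x hx => h x (by simp [hx]))]
    · rw [List.dropWhile_cons_of_neg hp, List.dropWhile_cons_of_neg (ha ▸ hp)]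

theorem pvTrim_eq_strip (l : List Char) (h : ∀ c ∈ l, pvDomChar c = true) :
    pvTrim l = PySem.Chars.strip l := by
  rw [pvTrim, PySem.Chars.strip, PySem.Chars.lstrip, PySem.Chars.rstrip]
  rw [pvDropWhile_congr pvWs PySem.Chars.isspace l (fun c hc => pvWs_eq_isspace c (h c hc))]
  congr 1
  apply pvDropWhile_congr
  intro c hc
  exact pvWs_eq_isspace c (h c ((List.dropWhile_sublist _).subset (List.mem_reverse.mp hc)))

-- splitting the mapped string on '/' = splitting the original on {'/','\\'}
theorem pvSplitC_map (t : List Char) : pvSplitC (t.map pvRepl) = pvSplitD t := by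
  induction t with
  | nil => rfl
  | cons c r ih =>
    by_cases hs : pvSep c = true
    · have hr : pvRepl c = '/' := by
        rcases (by simpa [pvSep] using hs : c = '/' ∨ c = '\\') with h | h <;> simp [pvRepl, h]
      simp [pvSplitC, pvSplitD, hr, hs, ih]
    · have hc : c ≠ '\\' := fun h => hs (by simp [pvSep, h])
      have hr : pvRepl c = c := by simp [pvRepl, hc]
      have hcs : c ≠ '/' := fun h => hs (by simp [pvSep, h])
      simp only [List.map_cons, pvSplitC, pvSplitD, hr, if_neg hcs, hs, Bool.false_eq_true,
        if_false, ih]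

-- B's scan equals pvProc over the segment list
theorem pvScan_eq_proc : ∀ (t : List Char) (out : List (List Char)) (seg : List Char),
    pvScan out seg t = pvProc out ((pvSplitD t).modifyHead (seg.reverse ++ ·))
  | [], out, seg => by
    simp [pvScan, pvSplitD, pvProc]
  | c :: r, out, seg => by
    rcases List.exists_cons_of_ne_nil (pvSplitD_ne_nil r) with ⟨h1, t1, he⟩
    have hscan1 : ∀ o, pvScan o ([] : List Char) r = pvProc o (pvSplitD r) := by
      intro o
      rw [pvScan_eq_proc r o []]
      rw [he]
      simp
    by_cases hs : pvSep c = true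
    · rw [pvScan]
      simp only [hs, if_true]
      rw [pvSplitD]
      simp only [hs, if_true, List.modifyHead_cons, List.append_nil]
      rw [he, pvProc, ← he]
      split_ifs with h1c h2c
      · exact hscan1 out
      · rfl
      · exact hscan1 (out ++ [seg.reverse])
    · rw [pvScan]
      simp only [hs, Bool.false_eq_true, if_false]
      rw [pvScan_eq_proc r out (c :: seg)]
      rw [pvSplitD]
      simp only [hs, Bool.false_eq_true, if_false]
      rw [he]
      simp

-- once past the leading '.' segments everything is good: pvProc appends the rest
theorem pvProc_good (l : List (List Char)) (hne : l ≠ [])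
    (h : ∀ p ∈ l, pvBad p = false) : ∀ out, pvProc out l = some (out ++ l) := by
  induction l with
  | nil => exact absurd rfl hne
  | cons s rest ih =>
    intro out
    have hbs : pvBad s = false := h s (by simp)
    have hdot : (s == ['.']) = false := by
      cases hb : s == ['.'] with
      | false => rfl
      | true =>
        exfalso
        have hx : s = ['.'] := by simpa using hb
        simp [pvBad, hx] at hbs
    cases rest with
    | nil => simp [pvProc, hbs]
    | cons x r =>
      rw [pvProc]
      simp only [hdot, Bool.false_and, Bool.false_eq_true, if_false, hbs, if_false]
      rw [ih (by simp) (fun p hp => h p (by simp [hp])) (out ++ [s])]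
      simp

-- with empty output pvProc first drops the leading '.' segments, then appends the good rest
theorem pvProc_drop (l : List (List Char))
    (hne : l.dropWhile (· == ['.']) ≠ [])
    (h : ∀ p ∈ l.dropWhile (· == ['.']), pvBad p = false) :
    pvProc [] l = some (l.dropWhile (· == ['.'])) := by
  induction l with
  | nil => simp at hne
  | cons s rest ih =>
    by_cases hs : s = ['.']
    · subst hs
      rw [List.dropWhile_cons_of_pos (by simp)] at hne h
      cases rest with
      | nil => simp at hne
      | cons x r =>
        rw [pvProc]
        simp only [beq_self_eq_true, List.isEmpty_nil, Bool.and_self, if_pos]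
        rw [ih hne h]
        conv_rhs => rw [List.dropWhile_cons_of_pos (by simp)]
    · rw [List.dropWhile_cons_of_neg (by simpa using hs)] at hne h ⊢
      exact (pvProc_good (s :: rest) (by simp) h []).trans (by simp)

-- startswith on a mapped cons
theorem pvStarts_slash (c : Char) (l : List Char) :
    PySem.Chars.startswith (pvRepl c :: l) ['/'] = pvSep c := by
  by_cases hs : pvSep c = true
  · have hr : pvRepl c = '/' := by
      rcases (by simpa [pvSep] using hs : c = '/' ∨ c = '\\') with h | h <;> simp [pvRepl, h]
    rw [hs, hr]
    exact (PySem.Chars.startswith_iff _ _).mpr ⟨l, rfl⟩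
  · have hc : c ≠ '\\' := fun h => hs (by simp [pvSep, h])
    have hcs : c ≠ '/' := fun h => hs (by simp [pvSep, h])
    have hr : pvRepl c = c := by simp [pvRepl, hc]
    rw [eq_false_of_ne_true hs, hr]
    rw [Bool.eq_false_iff]
    intro hsw
    rcases (PySem.Chars.startswith_iff _ _).mp hsw with ⟨t, ht⟩
    exact hcs (by simpa using congrArg (List.headI) ht.symm)

theorem pvStarts_bs (c : Char) (l : List Char) :
    PySem.Chars.startswith (pvRepl c :: l) ['\\'] = false := by
  rw [Bool.eq_false_iff]
  intro hsw
  rcases (PySem.Chars.startswith_iff _ _).mp hsw with ⟨t, ht⟩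
  have : pvRepl c = '\\' := by simpa using congrArg (List.headI) ht.symm
  by_cases hc : c = '\\' <;> simp [pvRepl, hc] at this

-- ===== VERDICT (by name: the statement is the Claim_ definition above) =====
theorem normalize_relative_path_spec : Claim_equal_normalize_relative_path := by
  intro raw hdom hpre
  obtain ⟨hne, hsw, hrest, hvalid⟩ := hpre
  unfold Spec_normalize_relative_path normalize_relative_path normalize_relative_path_alt
  rw [pvSplitOn_eq] at hrest hvalid
  simp only []
  have hdomall : ∀ c ∈ raw.toList, pvDomChar c = true := by
    intro c hc
    have : pvDomStr raw = true := hdom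
    rw [pvDomStr, List.all_eq_true] at this
    exact this c hc
  have htrim : pvTrim raw.toList = PySem.Chars.strip raw.toList :=
    pvTrim_eq_strip raw.toList hdomall
  have hmap := pvReplace_eq_map (PySem.Chars.strip raw.toList)
  rw [hmap] at hne hsw hrest hvalid ⊢
  rw [htrim]
  have hSne : PySem.Chars.strip raw.toList ≠ [] := fun h => hne (by simp [h])
  rcases List.exists_cons_of_ne_nil hSne with ⟨c, rest, hcr⟩
  rw [hcr] at hne hsw hrest hvalid ⊢
  simp only [List.map_cons] at hne hsw hrest hvalid ⊢
  have hsep : pvSep c = false := by rw [← pvStarts_slash c (rest.map pvRepl)]; exact hsw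
  rw [if_neg hne]
  simp only [pvStarts_slash, pvStarts_bs, hsep, Bool.or_false, Bool.false_eq_true, if_false]
  -- A's validation is false and A returns the stripped value
  have hvalid' : ∀ p ∈ (pvSplitC (pvRepl c :: rest.map pvRepl)).dropWhile (· == ['.']),
      pvBad p = false := by
    intro p hp
    rcases hvalid p hp with ⟨h1, h2, h3⟩
    simp [pvBad, h1, h2, h3]
  have hAparts :
      pvSplitC (pvAStripDotSlash (pvRepl c :: rest.map pvRepl))
        = (pvSplitC (pvRepl c :: rest.map pvRepl)).dropWhile (· == ['.']) := by
    rw [pvMain, pvBDrop_eq_dropWhile _ hrest]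
  rw [pvSplitOn_eq, hAparts]
  have hany : (((pvSplitC (pvRepl c :: rest.map pvRepl)).dropWhile (· == ['.'])).any
      fun p => p == [] || p == ['.'] || p == ['.', '.']) = false := by
    rw [List.any_eq_false]
    intro p hp
    have := hvalid' p hp
    simp [pvBad] at this
    simp [this]
  rw [hany]
  simp only [Bool.false_eq_true, if_false]
  -- B's branches
  have hscan : pvScan [] [] (c :: rest) = pvProc [] (pvSplitD (c :: rest)) := by
    rw [pvScan_eq_proc]
    rcases List.exists_cons_of_ne_nil (pvSplitD_ne_nil (c :: rest)) with ⟨h1, t1, he⟩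
    rw [he]
    simp
  have hDC : pvSplitD (c :: rest) = pvSplitC (pvRepl c :: rest.map pvRepl) := by
    rw [← pvSplitC_map]
    simp
  rw [hscan, hDC, pvProc_drop _ hrest hvalid']
  simp only []
  have hjoin : PySem.Chars.join ['/']
      ((pvSplitC (pvRepl c :: rest.map pvRepl)).dropWhile (· == ['.']))
        = pvAStripDotSlash (pvRepl c :: rest.map pvRepl) := by
    rw [← hAparts, pvJoin_splitC]
  rw [hjoin]
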